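-- pv_equiv track=rewrite | github.com/vileider/year-4 | coding/py/test1.py | f
-- ===== SOURCE A (Python) =====
-- def f(n:int):
--     c= 0
--     iter = 0
--     while n >= 0:
--         iter += 1
--         n= n-2
--         c = c+n-2
--     return c
-- ===== SOURCE B (Python) =====
-- def f(n: int):
--     # closed form: the loop runs k = n//2 + 1 times (for n >= 0),
--     # accumulating c = k*(n - k - 3)
--     if n < 0:
--         return 0
--     k = n // 2 + 1
--     return k * (n - k - 3)
-- ===== Notes on version B (the rewrite author's own statement) =====
-- stated objective: faster
-- what changed: replaced the decrement-by-2 accumulation loop with the closed-form k*(n-k-3) where k = n//2 + 1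
import Mathlib
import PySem

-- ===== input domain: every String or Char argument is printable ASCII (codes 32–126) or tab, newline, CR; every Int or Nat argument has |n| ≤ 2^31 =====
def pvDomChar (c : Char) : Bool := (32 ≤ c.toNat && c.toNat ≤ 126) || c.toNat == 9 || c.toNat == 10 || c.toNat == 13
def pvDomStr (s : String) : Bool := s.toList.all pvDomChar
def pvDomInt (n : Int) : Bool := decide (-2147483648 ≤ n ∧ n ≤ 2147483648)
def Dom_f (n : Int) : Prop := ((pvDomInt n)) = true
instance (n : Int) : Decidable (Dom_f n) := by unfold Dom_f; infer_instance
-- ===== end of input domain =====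

-- B replaces A's decrement-by-2 accumulation loop with the O(1) closed form k*(n-k-3), k = n//2+1.

-- ===== PORT A =====
-- the while loop: each iteration n := n-2; c := c + n - 2   (with the updated n)
def fLoop (n c : Int) : Int :=
  if 0 ≤ n then fLoop (n - 2) (c + (n - 2) - 2) else c
termination_by (n + 1).toNat
decreasing_by omega

def f (n : Int) : Int := fLoop n 0

-- ===== PORT B =====
def f_alt (n : Int) : Int :=
  if n < 0 then 0
  else
    let k := PySem.Int.floordiv n 2 + 1
    k * (n - k - 3)

-- ===== PRECONDITION & SPEC =====
def Spec_f (n : Int) (out : Int) : Prop := out = f_alt n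
instance (n : Int) (out : Int) : Decidable (Spec_f n out) := by unfold Spec_f; infer_instance

-- ===== CLAIM (what is proved, stated in full; the proofs are below) =====
def Claim_equal_f : Prop := ∀ (n : Int), Dom_f n → Spec_f n (f n)

-- ===== LEMMAS AND PROOFS =====
lemma fLoop_eq (n c : Int) :
    fLoop n c = c + (if 0 ≤ n then (n / 2 + 1) * (n - (n / 2 + 1) - 3) else 0) := by
  unfold fLoop
  split
  · rename_i hn
    rw [fLoop_eq (n - 2) (c + (n - 2) - 2)]
    by_cases h2 : 0 ≤ n - 2
    · have hk : (n - 2) / 2 = n / 2 - 1 := by omega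
      simp only [if_pos h2, hk]
      generalize n / 2 = q
      ring
    · have hq : n / 2 = 0 := by omega
      simp only [if_neg h2, hq]
      have : n = 0 ∨ n = 1 := by omega
      rcases this with h | h <;> subst h <;> ring
  · simp
termination_by (n + 1).toNat
decreasing_by omega

-- ===== VERDICT (by name: the statement is the Claim_ definition above) =====
theorem f_spec : Claim_equal_f := by
  intro n _
  show f n = f_alt n
  unfold f f_alt
  rw [fLoop_eq]
  by_cases hn : 0 ≤ n
  · rw [if_pos hn, if_neg (by omega), PySem.Int.floordiv_eq_ediv_of_pos (by omega)]
    ring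
  · rw [if_neg hn, if_pos (by omega)]
    ring
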